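-- pv_equiv track=rewrite | github.com/wilwe21/LeetCode | python/2460.py | applyOperations
-- ===== SOURCE A (Python) =====
-- from typing import List
--
-- def applyOperations(nums: List[int]) -> List[int]:
--     for i in range(len(nums)-1):
--         if nums[i] == nums[i+1]:
--             nums[i] = nums[i]*2
--             nums[i+1] = 0
--     zer = nums.count(0)
--     for i in range(zer):
--         nums.pop(nums.index(0))
--         nums.append(0)
--     return nums
-- ===== SOURCE B (Python) =====
-- from typing import List
--
-- def applyOperations(nums: List[int]) -> List[int]:
--     # One pass merging with a carried current value, then a stable partition:
--     # non-zeros in order followed by the zeros. (A mutates its argument in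
--     # place; B does not — equivalence is about the return value.)
--     if not nums:
--         return []
--     out = []
--     cur = nums[0]
--     for x in nums[1:]:
--         if cur == x:
--             out.append(cur * 2)
--             cur = 0
--         else:
--             out.append(cur)
--             cur = x
--     out.append(cur)
--     nz = [v for v in out if v != 0]
--     return nz + [0] * (len(out) - len(nz))
-- ===== Notes on version B (the rewrite author's own statement) =====
-- stated objective: alternative
-- what changed: Replaces A's in-place index loop plus repeated count/index/pop zero-shuffling with one carry-based merge pass followed by a stable partition (non-zeros then padded zeros), without mutating the argument.
import Mathlib
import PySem

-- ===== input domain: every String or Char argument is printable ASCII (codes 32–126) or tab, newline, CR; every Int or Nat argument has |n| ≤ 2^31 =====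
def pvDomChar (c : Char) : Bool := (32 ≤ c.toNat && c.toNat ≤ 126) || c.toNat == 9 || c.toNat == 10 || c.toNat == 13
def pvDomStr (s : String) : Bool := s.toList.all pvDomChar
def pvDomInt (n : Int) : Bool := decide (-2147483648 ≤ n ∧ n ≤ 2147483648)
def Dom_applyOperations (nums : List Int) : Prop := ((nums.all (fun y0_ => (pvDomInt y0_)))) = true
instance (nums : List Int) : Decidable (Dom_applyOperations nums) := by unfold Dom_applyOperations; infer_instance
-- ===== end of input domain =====

-- B replaces A's in-place merge-then-shuffle-zeros with one carry-based merge pass then a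
-- stable partition; equivalence is about the RETURN value (Python A mutates its argument).

-- ===== PORT A =====
-- first loop: for i in range(len(nums)-1): if nums[i]==nums[i+1]: nums[i]*=2; nums[i+1]=0
def pvMergeLoop (nums : List Int) : List Int :=
  (PySem.List.pyRange 0 ((nums.length : Int) - 1) 1).foldl
    (fun ns i =>
      if PySem.List.pyGetD ns i 0 == PySem.List.pyGetD ns (i + 1) 0 then
        PySem.List.pySetD (PySem.List.pySetD ns i (PySem.List.pyGetD ns i 0 * 2)) (i + 1) 0
      else ns) nums

-- second loop: for i in range(zer): nums.pop(nums.index(0)); nums.append(0)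
-- (index?/pop? can never be none here since zer = count of zeros; the fallback keeps it total)
def pvZeroLoop : Nat → List Int → List Int
  | 0, ns => ns
  | k + 1, ns =>
      let ns' :=
        match PySem.List.index? ns 0 with
        | some j =>
            match PySem.List.pop? ns (j : Int) with
            | some r => r.2
            | none => ns
        | none => ns
      pvZeroLoop k (ns' ++ [0])

def applyOperations (nums : List Int) : List Int :=
  let ns := pvMergeLoop nums
  pvZeroLoop (PySem.List.count ns 0) ns

-- ===== PORT B =====
-- carry pass: emit cur*2 and carry 0 on a merge, else emit cur and carry x
def pvMergeCarry (cur : Int) : List Int → List Int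
  | [] => [cur]
  | x :: xs => if cur == x then cur * 2 :: pvMergeCarry 0 xs else cur :: pvMergeCarry x xs

def applyOperations_alt (nums : List Int) : List Int :=
  match nums with
  | [] => []
  | c :: rest =>
      let out := pvMergeCarry c rest
      let nz := out.filter (fun v => v != 0)
      nz ++ List.replicate (out.length - nz.length) 0

-- ===== PRECONDITION & SPEC =====
def Spec_applyOperations (nums : List Int) (out : List Int) : Prop := out = applyOperations_alt nums
instance (nums : List Int) (out : List Int) : Decidable (Spec_applyOperations nums out) := by unfold Spec_applyOperations; infer_instance

-- ===== CLAIM (what is proved, stated in full; the proofs are below) =====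
def Claim_equal_applyOperations : Prop := ∀ (nums : List Int), Dom_applyOperations nums → Spec_applyOperations nums (applyOperations nums)

-- ===== LEMMAS AND PROOFS =====

-- list surgery at the length of a prefix
lemma pvSet_at_prefix (P : List Int) (y v : Int) (t : List Int) :
    (P ++ y :: t).set P.length v = P ++ v :: t := by
  induction P with
  | nil => rfl
  | cons p ps ih => simp [ih]

lemma pvGetD_at_prefix (P : List Int) (y : Int) (t : List Int) (d : Int) :
    (P ++ y :: t).getD P.length d = y := by
  induction P with
  | nil => rfl
  | cons p ps ih => simpa using ih

-- one step of A's first loop, seen from a processed prefix P and carry c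
lemma pvMergeLoop_go : ∀ (rest P : List Int) (c : Int),
    (PySem.List.pyRange (P.length : Int) ((P.length : Int) + rest.length) 1).foldl
      (fun ns i =>
        if PySem.List.pyGetD ns i 0 == PySem.List.pyGetD ns (i + 1) 0 then
          PySem.List.pySetD (PySem.List.pySetD ns i (PySem.List.pyGetD ns i 0 * 2)) (i + 1) 0
        else ns) (P ++ c :: rest) = P ++ pvMergeCarry c rest := by
  intro rest
  induction rest with
  | nil =>
      intro P c
      rw [PySem.List.pyRange_one_eq_nil (by simp)]
      simp [pvMergeCarry]
  | cons x xs ih =>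
      intro P c
      rw [PySem.List.pyRange_one_cons (by simp only [List.length_cons]; push_cast; omega),
        List.foldl_cons]
      have hget1 : PySem.List.pyGetD (P ++ c :: x :: xs) (P.length : Int) 0 = c := by
        rw [PySem.List.pyGetD_natCast]; exact pvGetD_at_prefix P c (x :: xs) 0
      have hget2 : PySem.List.pyGetD (P ++ c :: x :: xs) ((P.length : Int) + 1) 0 = x := by
        have : ((P.length : Int) + 1) = ((P ++ [c]).length : Int) := by simp only [List.length_append, List.length_cons, List.length_nil]; push_cast; ring
        rw [this, PySem.List.pyGetD_natCast]
        have : P ++ c :: x :: xs = (P ++ [c]) ++ x :: xs := (List.append_assoc P [c] (x :: xs)).symm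
        rw [this]; exact pvGetD_at_prefix (P ++ [c]) x xs 0
      by_cases hcx : c = x
      · subst hcx
        simp only [hget1, hget2, beq_self_eq_true, if_true]
        have hset1 : PySem.List.pySetD (P ++ c :: c :: xs) (P.length : Int) (c * 2)
            = P ++ (c * 2) :: c :: xs := by
          rw [PySem.List.pySetD_natCast]; exact pvSet_at_prefix P c (c * 2) (c :: xs)
        have hset2 : PySem.List.pySetD (P ++ (c * 2) :: c :: xs) ((P.length : Int) + 1) 0
            = P ++ (c * 2) :: 0 :: xs := by
          have h1 : ((P.length : Int) + 1) = ((P ++ [c * 2]).length : Int) := by simp only [List.length_append, List.length_cons, List.length_nil]; push_cast; ring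
          have h2 : P ++ (c * 2) :: c :: xs = (P ++ [c * 2]) ++ c :: xs := (List.append_assoc P [c * 2] (c :: xs)).symm
          have h3 : P ++ (c * 2) :: 0 :: xs = (P ++ [c * 2]) ++ 0 :: xs := (List.append_assoc P [c * 2] ((0:Int) :: xs)).symm
          rw [h1, h2, h3, PySem.List.pySetD_natCast]
          exact pvSet_at_prefix (P ++ [c * 2]) c 0 xs
        rw [hset1, hset2]
        have harg : P ++ (c * 2) :: 0 :: xs = (P ++ [c * 2]) ++ 0 :: xs := (List.append_assoc P [c * 2] ((0:Int) :: xs)).symm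
        have hlo : (P.length : Int) + 1 = (((P ++ [c * 2]).length : Int)) := by simp only [List.length_append, List.length_cons, List.length_nil]; push_cast; ring
        have hhi : (P.length : Int) + ((c :: xs).length : Int)
            = ((P ++ [c * 2]).length : Int) + (xs.length : Int) := by simp only [List.length_append, List.length_cons, List.length_nil]; push_cast; ring
        rw [harg, hlo, hhi, ih (P ++ [c * 2]) 0]
        simp [pvMergeCarry]
      · have hne : (c == x) = false := by simp [hcx]
        simp only [hget1, hget2, hne, if_false, Bool.false_eq_true]
        have harg : P ++ c :: x :: xs = (P ++ [c]) ++ x :: xs := (List.append_assoc P [c] (x :: xs)).symm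
        have hlo : (P.length : Int) + 1 = (((P ++ [c]).length : Int)) := by simp only [List.length_append, List.length_cons, List.length_nil]; push_cast; ring
        have hhi : (P.length : Int) + ((x :: xs).length : Int)
            = ((P ++ [c]).length : Int) + (xs.length : Int) := by simp only [List.length_append, List.length_cons, List.length_nil]; push_cast; ring
        rw [harg, hlo, hhi, ih (P ++ [c]) x]
        simp [pvMergeCarry, hcx]

lemma pvMergeLoop_eq (c : Int) (rest : List Int) :
    pvMergeLoop (c :: rest) = pvMergeCarry c rest := by
  unfold pvMergeLoop
  have h : ((c :: rest).length : Int) - 1 = (([] : List Int).length : Int) + (rest.length : Int) := by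
    simp
  rw [h]
  simpa using pvMergeLoop_go rest [] c

-- A's second loop removes the first k zeros and appends k zeros
lemma pvZeroLoop_spec : ∀ (k : Nat) (a b : List Int), a.count 0 = k →
    pvZeroLoop k (a ++ b) = a.filter (fun v => v != 0) ++ b ++ List.replicate k 0 := by
  intro k
  induction k with
  | zero =>
      intro a b hc
      have h0 : (0 : Int) ∉ a := List.count_eq_zero.mp hc
      have : a.filter (fun v => v != 0) = a :=
        List.filter_eq_self.mpr (by intro v hv; simp; rintro rfl; exact h0 hv)
      simp [pvZeroLoop, this]
  | succ k ih =>
      intro a b hc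
      have hmem : (0 : Int) ∈ a := by
        by_contra h
        rw [List.count_eq_zero.mpr h] at hc; omega
      obtain ⟨j, hj⟩ := Option.isSome_iff_exists.mp ((PySem.List.index?_isSome_iff a 0).mpr hmem)
      obtain ⟨pre, suf, hsplit, hlen, hpre⟩ := (PySem.List.index?_eq_some_iff a 0 j).mp hj
      have hidx : PySem.List.index? (a ++ b) 0 = some j := by
        rw [PySem.List.index?_append_of_mem b hmem]; exact hj
      have hjlt : j < (a ++ b).length := by
        subst hsplit
        rw [← hlen]
        simp
      have hpop := PySem.List.pop?_natCast (a ++ b) j hjlt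
      have herase : (a ++ b).eraseIdx j = (pre ++ suf) ++ b := by
        have hab : a ++ b = pre ++ 0 :: (suf ++ b) := by subst hsplit; simp
        rw [hab, ← hlen, List.eraseIdx_append_of_length_le (le_refl _)]
        simp
      have hcount : (pre ++ suf).count 0 = k := by
        subst hsplit
        have hp0 : pre.count 0 = 0 := List.count_eq_zero.mpr hpre
        simp only [List.count_append, List.count_cons, beq_self_eq_true, if_true, hp0] at hc ⊢
        omega
      simp only [pvZeroLoop, hidx, hpop]
      have := ih (pre ++ suf) (b ++ [0]) hcount
      rw [herase, List.append_assoc, this]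
      have hfilter : (pre ++ suf).filter (fun v => v != 0) = a.filter (fun v => v != 0) := by
        subst hsplit; simp
      rw [hfilter]
      simp [List.append_assoc, List.replicate_succ]

lemma pvLength_sub_filter (out : List Int) :
    out.length - (out.filter (fun v => v != 0)).length = out.count 0 := by
  induction out with
  | nil => rfl
  | cons x xs ih =>
      have hle : (xs.filter (fun v => v != 0)).length ≤ xs.length := List.length_filter_le _ _
      by_cases hx : x = 0
      · subst hx
        simp only [List.filter_cons, List.length_cons, List.count_cons]
        norm_num
        omega
      · have h1 : (x != 0) = true := by simp [hx]
        simp only [List.filter_cons, h1, if_true, List.length_cons, List.count_cons]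
        norm_num [hx]
        omega

-- ===== VERDICT (by name: the statement is the Claim_ definition above) =====
theorem applyOperations_spec : Claim_equal_applyOperations := by
  intro nums _
  unfold Spec_applyOperations
  match nums with
  | [] => rfl
  | c :: rest =>
      show applyOperations (c :: rest) = applyOperations_alt (c :: rest)
      have hz := pvZeroLoop_spec ((pvMergeCarry c rest).count 0) (pvMergeCarry c rest) [] rfl
      simp only [List.append_nil] at hz
      simp only [applyOperations, applyOperations_alt, pvMergeLoop_eq, PySem.List.count_eq,
        hz, pvLength_sub_filter]
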